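-- pv_equiv track=rewrite | github.com/NobutakaShimada/ai-swing | epi_anim.py | p2mA
-- ===== SOURCE A (Python) =====
-- def p2mA(x):
--     z=[] # + から - へ移るとき 1
--     for i in range(0, len(x)-1):
--         if (x[i]>0) and (x[i+1]<=0 ):
--             z.append(1)
--         else :
--              z.append(0)
--     return z
-- ===== SOURCE B (Python) =====
-- def p2mA(x):
--     n = len(x)
--     z = [0] * (n - 1)
--     j = 0
--     while j < n:
--         if x[j] > 0:
--             # extend over the maximal run of positive values starting at j
--             k = j
--             while k + 1 < n and x[k + 1] > 0:
--                 k += 1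
--             # the run ends with a drop to non-positive iff something follows it
--             if k < n - 1:
--                 z[k] = 1
--             j = k + 1
--         else:
--             j += 1
--     return z
-- ===== Notes on version B (the rewrite author's own statement) =====
-- stated objective: alternative
-- what changed: Instead of testing every adjacent pair, B preallocates a zero vector and scans by maximal runs of positive values, writing a single 1 at the last index of each positive run that is followed by a non-positive element, skipping over non-positive stretches.
import Mathlib
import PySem

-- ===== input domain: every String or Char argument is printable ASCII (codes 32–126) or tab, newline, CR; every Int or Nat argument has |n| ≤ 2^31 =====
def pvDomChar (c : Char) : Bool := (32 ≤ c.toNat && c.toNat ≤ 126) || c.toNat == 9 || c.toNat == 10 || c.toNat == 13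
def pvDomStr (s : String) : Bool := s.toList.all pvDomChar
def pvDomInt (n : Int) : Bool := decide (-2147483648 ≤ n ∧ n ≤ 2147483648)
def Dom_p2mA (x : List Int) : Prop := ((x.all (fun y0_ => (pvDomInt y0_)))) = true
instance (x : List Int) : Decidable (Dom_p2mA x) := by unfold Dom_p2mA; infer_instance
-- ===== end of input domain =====

-- B replaces the per-pair scan by a run-based algorithm: preallocate zeros, skip non-positive
-- stretches, and mark the last index of each positive run that is followed by an element (alternative; same cost).

-- ===== PORT A =====
def p2mA (x : List Int) : List Int :=
  -- for i in range(0, len(x)-1): append 1 / 0   (indices i, i+1 always in range)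
  (PySem.List.pyRange 0 ((x.length : Int) - 1) 1).foldl
    (fun z i =>
      if PySem.List.pyGetD x i 0 > 0 ∧ PySem.List.pyGetD x (i + 1) 0 ≤ 0 then z ++ [1]
      else z ++ [0]) []

-- ===== PORT B =====
-- inner while: while k+1 < n and x[k+1] > 0: k += 1   (fuel only makes the loop structural; it never runs out)
def p2mA_runEnd (x : List Int) (n : Nat) : Nat → Nat → Nat
  | 0, k => k
  | f + 1, k =>
    if k + 1 < n ∧ PySem.List.pyGetD x ((k : Int) + 1) 0 > 0 then
      p2mA_runEnd x n f (k + 1)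
    else k

-- outer while over j, writing into the preallocated z (fuel as above)
def p2mA_loop (x : List Int) (n : Nat) : Nat → List Int → Nat → List Int
  | 0, z, _ => z
  | f + 1, z, j =>
    if j < n then
      if PySem.List.pyGetD x (j : Int) 0 > 0 then
        let k := p2mA_runEnd x n (n - (j + 1)) j
        let z' := if k < n - 1 then z.set k 1 else z
        p2mA_loop x n f z' (k + 1)
      else p2mA_loop x n f z (j + 1)
    else z

def p2mA_alt (x : List Int) : List Int :=
  p2mA_loop x x.length (x.length + 1) (List.replicate (x.length - 1) 0) 0

-- ===== PRECONDITION & SPEC =====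
def Spec_p2mA (x : List Int) (out : List Int) : Prop := out = p2mA_alt x
instance (x : List Int) (out : List Int) : Decidable (Spec_p2mA x out) := by unfold Spec_p2mA; infer_instance

-- ===== CLAIM (what is proved, stated in full; the proofs are below) =====
def Claim_equal_p2mA : Prop := ∀ (x : List Int), Dom_p2mA x → Spec_p2mA x (p2mA x)

-- ===== LEMMAS AND PROOFS =====

-- the common characterisation: entry i is 1 iff x[i] > 0 and x[i+1] <= 0
def p2mA_tgtf (x : List Int) (i : Nat) : Int :=
  if PySem.List.pyGetD x (i : Int) 0 > 0 ∧ PySem.List.pyGetD x ((i : Int) + 1) 0 ≤ 0 then 1 else 0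

def p2mA_tgt (x : List Int) : List Int := (List.range (x.length - 1)).map (p2mA_tgtf x)

theorem p2mA_eq_map (x : List Int) :
    p2mA x = (PySem.List.pyRange 0 ((x.length : Int) - 1) 1).map
      (fun i => if PySem.List.pyGetD x i 0 > 0 ∧ PySem.List.pyGetD x (i + 1) 0 ≤ 0 then (1 : Int) else 0) := by
  unfold p2mA
  have h : (fun (z : List Int) i =>
      if PySem.List.pyGetD x i 0 > 0 ∧ PySem.List.pyGetD x (i + 1) 0 ≤ 0 then z ++ [(1:Int)] else z ++ [0])
      = fun z i => z ++ [if PySem.List.pyGetD x i 0 > 0 ∧ PySem.List.pyGetD x (i + 1) 0 ≤ 0 then (1:Int) else 0] := by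
    funext z i; split_ifs <;> rfl
  rw [h]
  induction (PySem.List.pyRange 0 ((x.length : Int) - 1) 1) using List.reverseRecOn with
  | nil => rfl
  | append_singleton l a ih => simp [List.foldl_append, ih]

theorem p2mA_eq_tgt (x : List Int) : p2mA x = p2mA_tgt x := by
  rw [p2mA_eq_map]
  unfold p2mA_tgt p2mA_tgtf
  apply List.ext_getElem
  · simp [PySem.List.length_pyRange_one]
  · intro k h1 h2
    simp only [List.getElem_map, PySem.List.getElem_pyRange_one, List.getElem_range]
    norm_num

-- properties of the inner while loop (under sufficient fuel)
theorem p2mA_runEnd_ge (x : List Int) (n : Nat) :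
    ∀ f k, k ≤ p2mA_runEnd x n f k := by
  intro f
  induction f with
  | zero => intro k; simp [p2mA_runEnd]
  | succ f ih =>
      intro k
      rw [p2mA_runEnd]
      split_ifs with h
      · exact le_trans (by omega) (ih (k + 1))
      · exact le_refl k

theorem p2mA_runEnd_lt (x : List Int) (n : Nat) :
    ∀ f k, k < n → p2mA_runEnd x n f k < n := by
  intro f
  induction f with
  | zero => intro k h; simpa [p2mA_runEnd] using h
  | succ f ih =>
      intro k h
      rw [p2mA_runEnd]
      split_ifs with hc
      · exact ih (k + 1) hc.1
      · exact h

theorem p2mA_runEnd_pos (x : List Int) (n : Nat) :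
    ∀ f k, ∀ i, k < i → i ≤ p2mA_runEnd x n f k → PySem.List.pyGetD x (i : Int) 0 > 0 := by
  intro f
  induction f with
  | zero => intro k i h1 h2; rw [p2mA_runEnd] at h2; omega
  | succ f ih =>
      intro k i h1 h2
      rw [p2mA_runEnd] at h2
      split_ifs at h2 with hc
      · rcases Nat.lt_or_ge (k + 1) i with h | h
        · exact ih (k + 1) i h h2
        · have hik : i = k + 1 := by omega
          subst hik
          have h2' := hc.2
          push_cast
          push_cast at h2'
          exact h2'
      · omega

theorem p2mA_runEnd_stop (x : List Int) (n : Nat) :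
    ∀ f k, n ≤ k + 1 + f →
      ¬ (p2mA_runEnd x n f k + 1 < n ∧ PySem.List.pyGetD x ((p2mA_runEnd x n f k : Int) + 1) 0 > 0) := by
  intro f
  induction f with
  | zero => intro k hf; rw [p2mA_runEnd]; intro hcon; omega
  | succ f ih =>
      intro k hf
      rw [p2mA_runEnd]
      split_ifs with hc
      · exact ih (k + 1) (by omega)
      · exact hc

-- invariant of the outer loop: entries below j are settled to the target, entries from j on are 0
theorem p2mA_loop_inv (x : List Int) (n : Nat) (hn : n = x.length) :
    ∀ f z j, n < j + f → z.length = n - 1 →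
      (∀ i, i < n - 1 → i < j → z.getD i 0 = p2mA_tgtf x i) →
      (∀ i, i < n - 1 → j ≤ i → z.getD i 0 = 0) →
      p2mA_loop x n f z j = p2mA_tgt x := by
  intro f
  induction f with
  | zero =>
      intro z j hf hl hset hzero
      rw [p2mA_loop]
      apply List.ext_getElem
      · simp [hl, p2mA_tgt, hn]
      · intro i h1 h2
        have hi : i < n - 1 := by omega
        rw [← List.getD_eq_getElem z 0 h1, hset i hi (by omega)]
        simp [p2mA_tgt]
  | succ f ih =>
      intro z j hf hl hset hzero
      rw [p2mA_loop]
      split_ifs with hj hpos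
      · -- x[j] > 0: skip the positive run ending at k, mark k if something follows
        set k := p2mA_runEnd x n (n - (j + 1)) j with hkdef
        have hkj : j ≤ k := p2mA_runEnd_ge x n (n - (j + 1)) j
        have hkn : k < n := p2mA_runEnd_lt x n (n - (j + 1)) j hj
        have hstop : ¬ (k + 1 < n ∧ PySem.List.pyGetD x ((k : Int) + 1) 0 > 0) :=
          p2mA_runEnd_stop x n (n - (j + 1)) j (by omega)
        set z' := if k < n - 1 then z.set k 1 else z with hz
        have hl' : z'.length = n - 1 := by rw [hz]; split_ifs <;> simp [hl]
        have hgd : ∀ i, i ≠ k → z'.getD i 0 = z.getD i 0 := by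
          intro i hik
          rw [hz]
          split_ifs with h
          · simp [List.getD_eq_getElem?_getD, hik.symm]
          · rfl
        refine ih z' (k + 1) (by omega) hl' ?_ ?_
        · intro i hi hij
          by_cases hik : i = k
          · rw [hik] at hi hij ⊢
            have hkz : k < z.length := by omega
            have hent : z'.getD k 0 = 1 := by
              rw [hz, if_pos hi]
              simp [List.getD_eq_getElem?_getD, hkz]
            rw [hent]
            unfold p2mA_tgtf
            have hx1 : PySem.List.pyGetD x (k : Int) 0 > 0 := by
              rcases Nat.eq_or_lt_of_le hkj with h | h
              · rw [← h]; exact hpos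
              · exact p2mA_runEnd_pos x n (n - (j + 1)) j k h (le_refl k)
            have hx2 : PySem.List.pyGetD x ((k : Int) + 1) 0 ≤ 0 := by
              by_contra hcon
              exact hstop ⟨by omega, by omega⟩
            exact (if_pos ⟨hx1, hx2⟩).symm
          · rw [hgd i hik]
            by_cases hij' : i < j
            · exact hset i hi hij'
            · have hji : j ≤ i := by omega
              have hik' : i < k := by omega
              rw [hzero i hi hji]
              unfold p2mA_tgtf
              have hnext : PySem.List.pyGetD x ((i : Int) + 1) 0 > 0 := by
                have h := p2mA_runEnd_pos x n (n - (j + 1)) j (i + 1) (by omega) (by omega)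
                push_cast at h
                exact h
              exact (if_neg (fun hcon => (not_le.mpr hnext) hcon.2)).symm
        · intro i hi hki
          rw [hgd i (by omega)]
          exact hzero i hi (by omega)
      · -- x[j] <= 0: this position cannot start a drop
        refine ih z (j + 1) (by omega) hl ?_ ?_
        · intro i hi hij
          by_cases h : i < j
          · exact hset i hi h
          · have hij' : i = j := by omega
            subst hij'
            rw [hzero i hi (le_refl i)]
            unfold p2mA_tgtf
            exact (if_neg (fun hcon => hpos hcon.1)).symm
        · intro i hi hij
          exact hzero i hi (by omega)
      · -- j >= n: the loop is done and z is the target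
        apply List.ext_getElem
        · simp [hl, p2mA_tgt, hn]
        · intro i h1 h2
          have hi : i < n - 1 := by omega
          rw [← List.getD_eq_getElem z 0 h1, hset i hi (by omega)]
          simp [p2mA_tgt]

theorem p2mA_alt_eq_tgt (x : List Int) : p2mA_alt x = p2mA_tgt x := by
  unfold p2mA_alt
  apply p2mA_loop_inv x x.length rfl
  · omega
  · simp
  · intro i hi hij; omega
  · intro i hi _
    simp [List.getD_eq_getElem?_getD, List.getElem?_replicate]
    split <;> rfl

-- ===== VERDICT (by name: the statement is the Claim_ definition above) =====
theorem p2mA_spec : Claim_equal_p2mA := by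
  intro x _
  show p2mA x = p2mA_alt x
  rw [p2mA_eq_tgt, p2mA_alt_eq_tgt]
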